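-- pv_equiv track=rewrite | github.com/chlee1252/dailyLeetCode | distributeCandies.py | distributionCandies
-- ===== SOURCE A (Python) =====
-- def distributionCandies(candies: int, num_people: int) -> [int]:
-- 	run = 0
-- 	out = [0] * num_people
-- 	while candies:
-- 		for i in range(num_people):
-- 			temp_increment = min(candies, run * num_people + (i+1))
-- 			out[i] += temp_increment
-- 			candies -= temp_increment
-- 			if candies == 0: return(out)
-- 		run += 1
-- ===== SOURCE B (Python) =====
-- def distributionCandies(candies: int, num_people: int) -> [int]:
-- 	# k = max m >= 0 with m*(m+1)//2 <= candies  (number of fully satisfied handouts)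
-- 	hi = 1
-- 	while hi * (hi + 1) // 2 <= candies:
-- 		hi *= 2
-- 	lo = 0  # invariant: lo*(lo+1)//2 <= candies < hi*(hi+1)//2
-- 	while hi - lo > 1:
-- 		mid = (lo + hi) // 2
-- 		if mid * (mid + 1) // 2 <= candies:
-- 			lo = mid
-- 		else:
-- 			hi = mid
-- 	k = lo
-- 	# person i got full handouts i+1, i+1+n, i+1+2n, ... among handouts 1..k
-- 	out = []
-- 	for i in range(num_people):
-- 		q = (k - i - 1) // num_people + 1 if i < k else 0
-- 		out.append(q * (i + 1) + num_people * q * (q - 1) // 2)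
-- 	# the remaining candies go to the next person in line
-- 	out[k % num_people] += candies - k * (k + 1) // 2
-- 	return out
-- ===== Notes on version B (the rewrite author's own statement) =====
-- stated objective: alternative
-- what changed: Replaces the round-by-round handout simulation with a closed form: binary-search the number k of fully served handouts, compute each person's share as an arithmetic-progression sum, and add the remainder to the next person in line.
-- outside the precondition, e.g. on distributionCandies(0, 3): A returns None, B returns [0, 0, 0]
import Mathlib
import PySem

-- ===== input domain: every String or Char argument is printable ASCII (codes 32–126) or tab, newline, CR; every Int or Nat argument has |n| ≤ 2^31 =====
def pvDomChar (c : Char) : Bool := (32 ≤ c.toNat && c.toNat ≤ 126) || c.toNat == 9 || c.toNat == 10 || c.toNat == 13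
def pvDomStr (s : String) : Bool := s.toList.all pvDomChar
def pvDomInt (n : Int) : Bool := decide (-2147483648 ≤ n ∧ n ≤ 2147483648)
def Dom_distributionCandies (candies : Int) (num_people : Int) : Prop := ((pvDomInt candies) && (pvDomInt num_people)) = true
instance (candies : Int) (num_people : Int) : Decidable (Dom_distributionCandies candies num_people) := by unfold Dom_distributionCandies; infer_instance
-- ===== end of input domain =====

-- B replaces A's round-by-round handout simulation by a closed form: binary search for the
-- number of fully served handouts + per-person arithmetic-progression sums (alternative algorithm).

-- ===== PORT A =====
-- inner `for i in range(num_people)` loop; Sum.inl = the early `return out`,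
-- Sum.inr = the for loop finished with state (candies, out).
-- out.set i / out.getD i 0 are exact for Python's out[i]: i ∈ range(len(out)) is always in range.
def pvAinner (np run : Int) (candies : Int) (out : List Int) : List Nat → (List Int ⊕ (Int × List Int))
  | [] => Sum.inr (candies, out)
  | i :: is =>
    let t := min candies (run * np + ((i : Int) + 1))
    let out' := out.set i (out.getD i 0 + t)
    let c' := candies - t
    if c' = 0 then Sum.inl out' else pvAinner np run c' out' is

-- the `while candies:` loop, fuel-bounded; the fuel-0 / normal-exit branches return the current
-- list and are never reached under Pre_ (each outer round strictly decreases candies by ≥ 1).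
def pvAouter (np : Int) : Nat → Int → Int → List Int → List Int
  | 0, _, _, out => out
  | fuel+1, run, candies, out =>
    if candies = 0 then out
    else match pvAinner np run candies out (List.range np.toNat) with
      | Sum.inl o => o
      | Sum.inr (c', o) => pvAouter np fuel (run+1) c' o

def distributionCandies (candies : Int) (num_people : Int) : List Int :=
  pvAouter num_people (candies.toNat + 1) 0 candies (List.replicate num_people.toNat 0)

-- ===== PORT B =====
-- `while hi*(hi+1)//2 <= candies: hi *= 2` (fuel-bounded; ample fuel, loop runs ≤ log₂ candies times)
def pvHiLoop (candies : Int) : Nat → Int → Int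
  | 0, hi => hi
  | f+1, hi => if PySem.Int.floordiv (hi*(hi+1)) 2 ≤ candies then pvHiLoop candies f (hi*2) else hi

-- `while hi - lo > 1: …` bisection (fuel-bounded; hi - lo halves each round)
def pvBisect (candies : Int) : Nat → Int → Int → Int
  | 0, lo, _ => lo
  | f+1, lo, hi =>
    if hi - lo > 1 then
      let mid := PySem.Int.floordiv (lo + hi) 2
      if PySem.Int.floordiv (mid*(mid+1)) 2 ≤ candies then pvBisect candies f mid hi
      else pvBisect candies f lo mid
    else lo

def distributionCandies_alt (candies : Int) (num_people : Int) : List Int :=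
  let hi := pvHiLoop candies (candies.toNat + 2) 1
  let k := pvBisect candies hi.toNat 0 hi
  let out := (List.range num_people.toNat).map (fun (i : Nat) =>
    let q := if (i:Int) < k then PySem.Int.floordiv (k - (i:Int) - 1) num_people + 1 else 0
    q * ((i:Int)+1) + PySem.Int.floordiv (num_people * q * (q-1)) 2)
  -- out[k % num_people] += candies - k*(k+1)//2 ; in range: 0 ≤ k % num_people < num_people
  let idx := (PySem.Int.mod k num_people).toNat
  out.set idx (out.getD idx 0 + (candies - PySem.Int.floordiv (k*(k+1)) 2))

-- ===== PRECONDITION & SPEC =====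
-- Pre_ excludes exactly the inputs where Python A returns no list: candies = 0 (A falls off the
-- while loop and returns None) and num_people ≤ 0 (A loops forever when candies ≠ 0).
def Pre_distributionCandies (candies : Int) (num_people : Int) : Prop :=
  candies ≠ 0 ∧ 1 ≤ num_people
instance (candies : Int) (num_people : Int) : Decidable (Pre_distributionCandies candies num_people) := by
  unfold Pre_distributionCandies; infer_instance

def pvWitness_distributionCandies : Int × Int := (7, 3)

def Spec_distributionCandies (candies : Int) (num_people : Int) (out : List Int) : Prop := out = distributionCandies_alt candies num_people
instance (candies : Int) (num_people : Int) (out : List Int) : Decidable (Spec_distributionCandies candies num_people out) := by unfold Spec_distributionCandies; infer_instance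

-- ===== CLAIM (what is proved, stated in full; the proofs are below) =====
def Claim_equal_distributionCandies : Prop := ∀ (candies : Int) (num_people : Int), Dom_distributionCandies candies num_people → Pre_distributionCandies candies num_people → Spec_distributionCandies candies num_people (distributionCandies candies num_people)

-- ===== LEMMAS AND PROOFS =====

-- pvT m = total candies in handouts 1..m
def pvT (m : Int) : Int := m*(m+1)/2
-- pvQ np m i = how many of handouts 1..m go to person i;  pvF np m i = how many candies that is
def pvQ (np m i : Int) : Int := if i < m then (m - i - 1)/np + 1 else 0
def pvF (np m i : Int) : Int := pvQ np m i * (i+1) + np * pvQ np m i * (pvQ np m i - 1) / 2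

theorem two_mul_pvT (m : Int) : 2 * pvT m = m * (m + 1) := by
  unfold pvT
  exact Int.mul_ediv_cancel' (Int.even_mul_succ_self m).two_dvd

theorem pvT_step (m : Int) : pvT (m+1) = pvT m + (m+1) := by
  have h1 := two_mul_pvT m
  have h2 : 2 * pvT (m+1) = m*(m+1) + 2*(m+1) := by rw [two_mul_pvT]; ring
  linarith

theorem pvT_mono {a b : Int} (h0 : 0 ≤ a) (h : a ≤ b) : pvT a ≤ pvT b := by
  have h1 := two_mul_pvT a
  have h2 := two_mul_pvT b
  nlinarith

theorem pvK_unique {C a b : Int} (ha0 : 0 ≤ a) (hb0 : 0 ≤ b)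
    (ha1 : pvT a ≤ C) (ha2 : C < pvT (a+1)) (hb1 : pvT b ≤ C) (hb2 : C < pvT (b+1)) : a = b := by
  by_contra hne
  rcases lt_or_gt_of_ne hne with h | h
  · have := pvT_mono (by omega : (0:Int) ≤ a + 1) (by omega : a + 1 ≤ b); omega
  · have := pvT_mono (by omega : (0:Int) ≤ b + 1) (by omega : b + 1 ≤ a); omega

theorem pvF_zero (np i : Int) (h : 0 ≤ i) : pvF np 0 i = 0 := by
  unfold pvF pvQ
  rw [if_neg (by omega)]
  simp

theorem pvF_step (np m i : Int) (hnp : 1 ≤ np) (hm : 0 ≤ m) (hi : 0 ≤ i) (hilt : i < np) :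
    pvF np (m+1) i = pvF np m i + (if i = m % np then m + 1 else 0) := by
  have hnp0 : np ≠ 0 := by omega
  by_cases hip : i = m % np
  · -- person i receives handout m+1
    have hmr : np * (m / np) + m % np = m := Int.ediv_add_emod m np
    set r := m / np with hr
    have hr0 : 0 ≤ r := Int.ediv_nonneg hm (by omega)
    have hnpr : 0 ≤ np * r := mul_nonneg (by omega) hr0
    have hmi : np * r + i = m := by rw [hip]; exact hmr
    have hQ1 : pvQ np (m+1) i = r + 1 := by
      unfold pvQ
      rw [if_pos (by linarith)]
      have e : m + 1 - i - 1 = np * r := by linarith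
      rw [e, Int.mul_ediv_cancel_left r hnp0]
    have hQ0 : pvQ np m i = r := by
      unfold pvQ
      by_cases him : i < m
      · rw [if_pos him]
        have hr1 : 1 ≤ r := by nlinarith
        have e : m - i - 1 = (np - 1) + np * (r - 1) := by
          have : np * (r - 1) = np * r - np := by ring
          linarith
        rw [e, Int.add_mul_ediv_left _ _ hnp0,
          Int.ediv_eq_zero_of_lt (by omega) (by omega)]
        ring
      · rw [if_neg him]
        have : np * r = 0 := by linarith
        have : r = 0 := by
          rcases mul_eq_zero.mp this with h | h
          · omega
          · exact h
        omega
    obtain ⟨B2, hB2⟩ : (2:Int) ∣ np * r * (r - 1) := by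
      obtain ⟨x, hx⟩ : ∃ x, (r - 1) * (r - 1 + 1) = x + x := Int.even_mul_succ_self (r - 1)
      have hx' : (r - 1) * r = x + x := by linear_combination hx
      exact ⟨np * x, by rw [show np * r * (r-1) = np * ((r-1)*r) by ring, hx']; ring⟩
    have hd0 : np * r * (r - 1) / 2 = B2 := by
      rw [hB2, Int.mul_ediv_cancel_left _ (by norm_num : (2:Int) ≠ 0)]
    have hd1 : np * (r + 1) * (r + 1 - 1) / 2 = B2 + np * r := by
      have e : np * (r + 1) * (r + 1 - 1) = (B2 + np * r) * 2 := by
        have : np * (r + 1) * r = np * r * (r - 1) + np * r * 2 := by ring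
        rw [show np * (r+1) * (r+1-1) = np * (r+1) * r by ring, this, hB2]; ring
      rw [e, Int.mul_ediv_cancel _ (by norm_num : (2:Int) ≠ 0)]
    rw [if_pos hip]
    unfold pvF
    rw [hQ1, hQ0, hd1, hd0]
    linarith
  · -- person i's share is unchanged
    rw [if_neg hip]
    by_cases him : i < m
    · have hQeq : pvQ np (m+1) i = pvQ np m i := by
        unfold pvQ
        rw [if_pos (by omega), if_pos him,
          show m + 1 - i - 1 = m - i by ring]
        have hst : np * ((m-i-1) / np) + (m-i-1) % np = m - i - 1 := Int.ediv_add_emod _ _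
        set s := (m-i-1) / np with hs
        set t := (m-i-1) % np with ht
        have ht0 : 0 ≤ t := Int.emod_nonneg _ hnp0
        have htn : t < np := Int.emod_lt_of_pos _ (by omega)
        have htne : t ≠ np - 1 := by
          intro h
          apply hip
          have e1 : np * (s + 1) = np * s + np := by ring
          have e2 : i + np * (s + 1) = m := by linarith
          have : (i + np * (s + 1)) % np = i % np := Int.add_mul_emod_self_left ..
          rw [e2, Int.emod_eq_of_lt hi hilt] at this
          exact this.symm
        have e : m - i = (t + 1) + np * s := by linarith
        rw [e, Int.add_mul_ediv_left _ _ hnp0,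
          Int.ediv_eq_zero_of_lt (by omega) (by omega)]
        simp
      unfold pvF
      rw [hQeq]
      ring
    · have him1 : ¬ (i < m + 1) := by
        intro h
        have : i = m := by omega
        apply hip
        rw [← this] at *
        exact (Int.emod_eq_of_lt hi hilt).symm
      unfold pvF pvQ
      rw [if_neg him, if_neg him1]
      norm_num

-- ===== A-side characterization =====

theorem pv_getD_set (l : List Int) (i j : Nat) (v : Int) (h : i < l.length) :
    (l.set i v).getD j 0 = if j = i then v else l.getD j 0 := by
  by_cases hj : j = i
  · subst hj; simp [List.getD_eq_getElem?_getD, h]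
  · simp [List.getD_eq_getElem?_getD, List.getElem?_set_ne (by omega : i ≠ j), hj]

theorem pv_mod_eq (np run : Int) (i0 : Nat) (hnp : 1 ≤ np) (hlt : (i0:Int) < np) :
    (run * np + (i0:Int)) % np = (i0:Int) := by
  rw [show run * np + (i0:Int) = (i0:Int) + np * run by ring, Int.add_mul_emod_self_left]
  exact Int.emod_eq_of_lt (by positivity) hlt

-- the list after the final (exhausting) handout agrees pointwise with the closed form
theorem pv_final_pt (np run C k : Int) (i0 j : Nat) (hnp : 1 ≤ np) (hrun : 0 ≤ run)
    (hk0 : 0 ≤ k) (hkC : pvT k ≤ C) (hCk : C < pvT (k+1))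
    (hi0 : (i0:Int) < np) (hj : (j:Int) < np)
    (hT : pvT (run*np + (i0:Int)) < C) (hstop : C ≤ pvT (run*np + (i0:Int) + 1)) :
    (if j = i0 then pvF np (run*np + (i0:Int)) i0 + (C - pvT (run*np + (i0:Int)))
     else pvF np (run*np + (i0:Int)) j)
      = pvF np k j + (if (j:Int) = k % np then C - pvT k else 0) := by
  set m : Int := run * np + (i0:Int) with hmdef
  have hm0 : 0 ≤ m := by positivity
  have hmod : m % np = (i0:Int) := pv_mod_eq np run i0 hnp hi0
  have hTm1 : pvT (m+1) = pvT m + (m+1) := pvT_step m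
  have hstep := pvF_step np m j hnp hm0 (by positivity) hj
  by_cases hCeq : C = pvT (m + 1)
  · have hk : k = m + 1 := by
      refine pvK_unique hk0 (by omega) hkC hCk (by omega) ?_
      have := pvT_step (m+1)
      omega
    subst hk
    rw [hstep, hmod]
    by_cases hji : j = i0
    · subst hji
      rw [if_pos rfl, if_pos rfl]
      split_ifs <;> linarith
    · have hji' : ¬ ((j:Int) = (i0:Int)) := fun h => hji (by exact_mod_cast h)
      rw [if_neg hji, if_neg hji']
      split_ifs <;> linarith
  · have hk : k = m := by
      refine pvK_unique hk0 hm0 hkC hCk (by omega) (by omega)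
    subst hk
    rw [hmod]
    by_cases hji : j = i0
    · subst hji; rw [if_pos rfl, if_pos rfl]
    · have hji' : ¬ ((j:Int) = (i0:Int)) := fun h => hji (by exact_mod_cast h)
      rw [if_neg hji, if_neg hji']; ring

theorem pv_adv_pt (np run : Int) (i0 j : Nat) (hnp : 1 ≤ np) (hrun : 0 ≤ run)
    (hi0 : (i0:Int) < np) (hj : (j:Int) < np) :
    (if j = i0 then pvF np (run*np + (i0:Int)) i0 + (run*np + (i0:Int) + 1)
     else pvF np (run*np + (i0:Int)) j)
      = pvF np (run*np + (i0:Int) + 1) j := by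
  set m : Int := run * np + (i0:Int) with hmdef
  have hstep := pvF_step np m j hnp (by positivity) (by positivity) hj
  rw [show m + 1 = m + 1 by rfl] at hstep
  rw [hstep, pv_mod_eq np run i0 hnp hi0]
  by_cases hji : j = i0
  · subst hji; rw [if_pos rfl, if_pos rfl]
  · have hji' : ¬ ((j:Int) = (i0:Int)) := fun h => hji (by exact_mod_cast h)
    rw [if_neg hji, if_neg hji']; ring

theorem pvAinner_spec (np run C k : Int) (hnp : 1 ≤ np) (hrun : 0 ≤ run)
    (hk0 : 0 ≤ k) (hkC : pvT k ≤ C) (hCk : C < pvT (k+1)) :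
    ∀ (len i0 : Nat) (c : Int) (out : List Int),
      i0 + len = np.toNat →
      out.length = np.toNat →
      (∀ j : Nat, j < np.toNat → out.getD j 0 = pvF np (run*np + i0) j) →
      c = C - pvT (run*np + i0) → 0 < c →
      (C ≤ pvT (run*np + i0 + len) ∧
        ∃ l, pvAinner np run c out (List.range' i0 len) = Sum.inl l ∧ l.length = np.toNat ∧
          ∀ j : Nat, j < np.toNat →
            l.getD j 0 = pvF np k j + (if (j:Int) = k % np then C - pvT k else 0)) ∨
      (pvT (run*np + i0 + len) < C ∧
        ∃ l, pvAinner np run c out (List.range' i0 len) =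
              Sum.inr (C - pvT (run*np + i0 + len), l) ∧ l.length = np.toNat ∧
          ∀ j : Nat, j < np.toNat → l.getD j 0 = pvF np (run*np + i0 + len) j) := by
  intro len
  induction len with
  | zero =>
    intro i0 c out hi0 hlen hout hc hcpos
    have e : run*np + (i0:Int) + ((0:Nat):Int) = run*np + (i0:Int) := by push_cast; ring
    rw [e]
    right
    refine ⟨by linarith, out, ?_, hlen, by simpa using hout⟩
    show Sum.inr (c, out) = _
    rw [hc]
  | succ len ih =>
    intro i0 c out hi0 hlen hout hc hcpos
    have hi0np : (i0:Int) < np := by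
      have : i0 < np.toNat := by omega
      omega
    set m : Int := run * np + (i0:Int) with hmdef
    have hm0 : 0 ≤ m := by positivity
    have hsetlen : i0 < out.length := by omega
    have houti0 : out.getD i0 0 = pvF np m i0 := hout i0 (by omega)
    have hTm1 : pvT (m+1) = pvT m + (m+1) := pvT_step m
    have hidx : run * np + (i0:Int) + ((len:Int) + 1) = (m + 1) + (len:Int) := by ring
    rw [List.range'_succ]
    have hunf : pvAinner np run c out (i0 :: List.range' (i0+1) len) =
        (let t := min c (run * np + ((i0:Int) + 1));
         let out' := out.set i0 (out.getD i0 0 + t);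
         let c' := c - t;
         if c' = 0 then Sum.inl out' else pvAinner np run c' out' (List.range' (i0+1) len)) := rfl
    by_cases hstop : c ≤ m + 1
    · -- this handout exhausts the candies: early return
      left
      have hres : pvAinner np run c out (i0 :: List.range' (i0+1) len) =
          Sum.inl (out.set i0 (out.getD i0 0 + c)) := by
        rw [hunf]
        simp only [show run * np + ((i0:Int) + 1) = m + 1 by ring, min_eq_left hstop]
        simp
      have hCle1 : C ≤ pvT (m+1) := by linarith
      constructor
      · push_cast
        rw [hidx]
        exact le_trans hCle1 (pvT_mono (by omega) (by omega))
      · refine ⟨_, hres, by simpa using hlen, ?_⟩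
        intro j hj
        have hjnp : (j:Int) < np := by omega
        rw [houti0, pv_getD_set out i0 j _ hsetlen]
        have := pv_final_pt np run C k i0 j hnp hrun hk0 hkC hCk hi0np hjnp
          (by rw [← hmdef]; linarith) (by rw [← hmdef]; exact hCle1)
        rw [← this]
        split_ifs with h
        · rw [← hmdef]; linarith
        · rw [← hmdef]; exact hout j hj
    · -- full handout m+1, continue with the rest of the round
      have hc' : c - (m+1) ≠ 0 := by omega
      have hres : pvAinner np run c out (i0 :: List.range' (i0+1) len) =
          pvAinner np run (c - (m+1)) (out.set i0 (out.getD i0 0 + (m+1)))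
            (List.range' (i0+1) len) := by
        rw [hunf]
        simp only [show run * np + ((i0:Int) + 1) = m + 1 by ring,
          min_eq_right (by omega : m + 1 ≤ c)]
        simp [hc']
      have hout' : ∀ j : Nat, j < np.toNat →
          (out.set i0 (out.getD i0 0 + (m+1))).getD j 0 = pvF np (run*np + ((i0+1 : Nat):Int)) j := by
        intro j hj
        have hjnp : (j:Int) < np := by omega
        rw [houti0, pv_getD_set out i0 j _ hsetlen]
        have := pv_adv_pt np run i0 j hnp hrun hi0np hjnp
        rw [show run*np + ((i0+1 : Nat):Int) = m + 1 by push_cast; ring, ← this]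
        split_ifs with h
        · rfl
        · exact hout j hj
      have ihh := ih (i0+1) (c - (m+1)) (out.set i0 (out.getD i0 0 + (m+1)))
        (by omega) (by simpa using hlen) hout'
        (by rw [show run*np + ((i0+1 : Nat):Int) = m + 1 by push_cast; ring]; omega)
        (by omega)
      rw [show run*np + ((i0+1 : Nat):Int) + (len:Int) = m + 1 + (len:Int) by push_cast; ring] at ihh
      rw [hres]
      push_cast
      rw [hidx]
      exact ihh

theorem pvAouter_spec (np C k : Int) (hnp : 1 ≤ np)
    (hk0 : 0 ≤ k) (hkC : pvT k ≤ C) (hCk : C < pvT (k+1)) :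
    ∀ (fuel : Nat) (run c : Int) (out : List Int),
      0 ≤ run →
      out.length = np.toNat →
      (∀ j : Nat, j < np.toNat → out.getD j 0 = pvF np (run*np) j) →
      c = C - pvT (run*np) → 0 < c → c.toNat ≤ fuel →
      (pvAouter np fuel run c out).length = np.toNat ∧
      ∀ j : Nat, j < np.toNat →
        (pvAouter np fuel run c out).getD j 0 =
          pvF np k j + (if (j:Int) = k % np then C - pvT k else 0) := by
  intro fuel
  induction fuel with
  | zero => intro run c out hrun hlen hout hc hcpos hfuel; omega
  | succ fuel ih =>
    intro run c out hrun hlen hout hc hcpos hfuel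
    have hnp' : (np.toNat : Int) = np := Int.toNat_of_nonneg (by omega)
    have hcne : ¬ (c = 0) := by omega
    have hrn : 0 ≤ run * np := mul_nonneg hrun (by omega)
    have hinner := pvAinner_spec np run C k hnp hrun hk0 hkC hCk np.toNat 0 c out
      (by omega) hlen
      (by intro j hj
          rw [show run*np + ((0:Nat):Int) = run*np by push_cast; ring]
          exact hout j hj)
      (by rw [show run*np + ((0:Nat):Int) = run*np by push_cast; ring]; exact hc) hcpos
    rw [show run*np + ((0:Nat):Int) + (np.toNat:Int) = (run+1)*np by
      rw [hnp']; push_cast; ring] at hinner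
    rcases hinner with ⟨hCle, l, hres, hllen, hlpt⟩ | ⟨hClt, l, hres, hllen, hlpt⟩
    · have heq : pvAouter np (fuel+1) run c out = l := by
        simp only [pvAouter, if_neg hcne, List.range_eq_range', hres]
      rw [heq]
      exact ⟨hllen, hlpt⟩
    · have heq : pvAouter np (fuel+1) run c out =
          pvAouter np fuel (run+1) (C - pvT ((run+1)*np)) l := by
        simp only [pvAouter, if_neg hcne, List.range_eq_range', hres]
      have hgap : pvT (run*np) + np ≤ pvT ((run+1)*np) := by
        nlinarith [two_mul_pvT (run*np), two_mul_pvT ((run+1)*np),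
          mul_nonneg hrn (show (0:Int) ≤ np by omega), sq_nonneg np]
      have habs : ∀ x : Int, x ≤ c - 1 → x.toNat ≤ fuel := by
        intro x hx
        have : c.toNat ≤ fuel + 1 := hfuel
        omega
      have hfuel' : (C - pvT ((run+1)*np)).toNat ≤ fuel := habs _ (by linarith)
      rw [heq]
      exact ih (run+1) (C - pvT ((run+1)*np)) l (by omega) hllen hlpt rfl
        (by linarith) hfuel'

-- ===== B-side characterization =====

theorem pvHiLoop_spec (C : Int) (hC : 0 < C) :
    ∀ (f : Nat) (hi : Int), 1 ≤ hi → (C + 1 - hi).toNat ≤ f →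
      1 ≤ pvHiLoop C f hi ∧ C < pvT (pvHiLoop C f hi) := by
  intro f
  induction f with
  | zero =>
    intro hi h1 hf
    have hge : C + 1 ≤ hi := by omega
    simp only [pvHiLoop]
    refine ⟨h1, ?_⟩
    have := two_mul_pvT hi
    nlinarith
  | succ f ih =>
    intro hi h1 hf
    have hfd : PySem.Int.floordiv (hi*(hi+1)) 2 = pvT hi :=
      PySem.Int.floordiv_eq_ediv_of_pos (by norm_num)
    simp only [pvHiLoop, hfd]
    by_cases hle : pvT hi ≤ C
    · rw [if_pos hle]
      exact ih (hi*2) (by omega) (by omega)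
    · rw [if_neg hle]
      exact ⟨h1, by omega⟩

theorem pvBisect_spec (C : Int) :
    ∀ (f : Nat) (lo hi : Int), 0 ≤ lo → lo < hi → pvT lo ≤ C → C < pvT hi →
      (hi - lo).toNat ≤ f →
      0 ≤ pvBisect C f lo hi ∧ pvT (pvBisect C f lo hi) ≤ C ∧ C < pvT (pvBisect C f lo hi + 1) := by
  intro f
  induction f with
  | zero => intro lo hi h0 hlh hTlo hThi hf; omega
  | succ f ih =>
    intro lo hi h0 hlh hTlo hThi hf
    by_cases hgt : hi - lo > 1
    · have hfd : PySem.Int.floordiv (lo + hi) 2 = (lo + hi) / 2 :=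
        PySem.Int.floordiv_eq_ediv_of_pos (by norm_num)
      have hfd2 : PySem.Int.floordiv ((lo+hi)/2 * ((lo+hi)/2 + 1)) 2 = pvT ((lo+hi)/2) :=
        PySem.Int.floordiv_eq_ediv_of_pos (by norm_num)
      simp only [pvBisect, if_pos hgt, hfd, hfd2]
      by_cases hle : pvT ((lo+hi)/2) ≤ C
      · rw [if_pos hle]
        exact ih _ hi (by omega) (by omega) hle hThi (by omega)
      · rw [if_neg hle]
        exact ih lo _ h0 (by omega) hTlo (by omega) (by omega)
    · simp only [pvBisect, if_neg hgt]
      have : hi = lo + 1 := by omega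
      rw [this] at hThi
      exact ⟨h0, hTlo, hThi⟩

theorem pvT_zero : pvT 0 = 0 := by norm_num [pvT]

theorem pv_map_range_getD (n : Nat) (f : Nat → Int) (j : Nat) (hj : j < n) :
    ((List.range n).map f).getD j 0 = f j := by
  simp [List.getD_eq_getElem?_getD, hj]

-- the body of B's list comprehension is exactly the closed-form share pvF
theorem pv_body_eq (np k : Int) (jj : Int) (hnp : 1 ≤ np) :
    (if jj < k then PySem.Int.floordiv (k - jj - 1) np + 1 else 0) * (jj+1) +
      PySem.Int.floordiv (np * (if jj < k then PySem.Int.floordiv (k - jj - 1) np + 1 else 0) *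
        ((if jj < k then PySem.Int.floordiv (k - jj - 1) np + 1 else 0) - 1)) 2 = pvF np k jj := by
  rw [PySem.Int.floordiv_eq_ediv_of_pos (show (0:Int) < np by omega),
    PySem.Int.floordiv_eq_ediv_of_pos (show (0:Int) < 2 by norm_num)]
  rfl

theorem pvAlt_spec (C np : Int) (hnp : 1 ≤ np) (hC : 0 < C) :
    ∃ k, 0 ≤ k ∧ pvT k ≤ C ∧ C < pvT (k+1) ∧
      (distributionCandies_alt C np).length = np.toNat ∧
      ∀ j : Nat, j < np.toNat →
        (distributionCandies_alt C np).getD j 0 =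
          pvF np k j + (if (j:Int) = k % np then C - pvT k else 0) := by
  obtain ⟨hhi1, hhiT⟩ := pvHiLoop_spec C hC (C.toNat + 2) 1 le_rfl (by omega)
  set hi : Int := pvHiLoop C (C.toNat + 2) 1 with hhidef
  obtain ⟨hk0, hkT, hkT1⟩ := pvBisect_spec C hi.toNat 0 hi le_rfl (by omega)
    (by rw [pvT_zero]; omega) hhiT (by omega)
  set k : Int := pvBisect C hi.toNat 0 hi with hkdef
  have hmodd : PySem.Int.mod k np = k % np := PySem.Int.mod_eq_emod_of_pos (by omega)
  have hm0 : 0 ≤ k % np := Int.emod_nonneg k (by omega)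
  have hmlt : k % np < np := Int.emod_lt_of_pos k (by omega)
  have hfdk : PySem.Int.floordiv (k*(k+1)) 2 = pvT k :=
    PySem.Int.floordiv_eq_ediv_of_pos (by norm_num)
  have hidx : (k % np).toNat < np.toNat := by omega
  have hcast : ((k % np).toNat : Int) = k % np := Int.toNat_of_nonneg hm0
  refine ⟨k, hk0, hkT, hkT1, ?_, ?_⟩
  · simp only [distributionCandies_alt, ← hhidef, ← hkdef, hmodd, hfdk]
    simp
  · intro j hj
    simp only [distributionCandies_alt, ← hhidef, ← hkdef, hmodd, hfdk]
    rw [pv_getD_set _ _ _ _ (by simpa using hidx),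
      pv_map_range_getD _ _ ((k % np).toNat) hidx]
    by_cases hji : j = (k % np).toNat
    · subst hji
      rw [if_pos rfl, pv_body_eq np k _ hnp, hcast, if_pos rfl]
    · have hji' : ¬ ((j:Int) = k % np) := by
        rw [← hcast]
        exact fun h => hji (by exact_mod_cast h)
      rw [if_neg hji, if_neg hji', pv_map_range_getD _ _ j hj, pv_body_eq np k _ hnp]
      ring

theorem pv_neg_case (C np : Int) (hnp : 1 ≤ np) (hC : C < 0) :
    distributionCandies C np = distributionCandies_alt C np := by
  have hfuel : C.toNat + 1 = 1 := by omega
  obtain ⟨nm, hnm⟩ : ∃ nm, np.toNat = nm + 1 := ⟨np.toNat - 1, by omega⟩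
  have hrange : List.range np.toNat = 0 :: List.range' 1 nm := by
    rw [List.range_eq_range', hnm, List.range'_succ]
  -- A side: the very first handout already exhausts (gives all of the negative amount)
  have hA : distributionCandies C np = (List.replicate np.toNat 0).set 0 C := by
    unfold distributionCandies
    rw [hfuel]
    simp only [pvAouter, if_neg (show ¬ C = 0 by omega), hrange, pvAinner]
    have h01 : (0:Int) * np + (((0:Nat):Int) + 1) = 1 := by push_cast; ring
    rw [h01, min_eq_left (by omega : C ≤ 1)]
    simp [List.getD_eq_getElem?_getD, show 0 < np.toNat by omega]
  -- B side: hi = 1, k = 0, every closed-form share is 0, remainder C goes to person 0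
  have hhi : pvHiLoop C (C.toNat + 2) 1 = 1 := by
    have h2 : C.toNat + 2 = 1 + 1 := by omega
    rw [h2]
    simp only [pvHiLoop]
    rw [if_neg]
    intro h
    rw [PySem.Int.floordiv_eq_ediv_of_pos (by norm_num)] at h
    norm_num at h
    omega
  have hB : distributionCandies_alt C np = (List.replicate np.toNat 0).set 0 C := by
    have hk : pvBisect C (1:Int).toNat 0 1 = 0 := by simp [pvBisect]
    have hmod0 : PySem.Int.mod 0 np = 0 := by
      rw [PySem.Int.mod_eq_emod_of_pos (by omega)]
      simp
    have hfd0 : PySem.Int.floordiv ((0:Int)*((0:Int)+1)) 2 = 0 := by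
      rw [PySem.Int.floordiv_eq_ediv_of_pos (by norm_num)]
      norm_num
    simp only [distributionCandies_alt]
    rw [hhi, hk, hmod0, hfd0]
    apply List.ext_getElem (by simp)
    intro j hj1 hj2
    have hjn : j < np.toNat := by simpa using hj2
    simp only [List.getElem_set, List.getElem_map, List.getElem_range,
      List.getElem_replicate, Int.toNat_zero]
    by_cases h0 : 0 = j
    · rw [if_pos h0, if_pos h0]
      rw [pv_map_range_getD _ _ 0 (by omega), pv_body_eq np 0 _ hnp,
        pvF_zero np _ (by positivity)]
      ring
    · rw [if_neg h0, if_neg h0, pv_body_eq np 0 _ hnp, pvF_zero np _ (by positivity)]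
  rw [hA, hB]

-- ===== VERDICT (by name: the statement is the Claim_ definition above) =====
theorem distributionCandies_spec : Claim_equal_distributionCandies := by
  intro candies np hdom hpre
  obtain ⟨hc0, hnp⟩ := hpre
  unfold Spec_distributionCandies
  rcases lt_or_gt_of_ne hc0 with hneg | hpos
  · exact pv_neg_case candies np hnp hneg
  · obtain ⟨k, hk0, hkC, hCk, hblen, hbpt⟩ := pvAlt_spec candies np hnp hpos
    have hA := pvAouter_spec np candies k hnp hk0 hkC hCk (candies.toNat + 1) 0 candies
      (List.replicate np.toNat 0) le_rfl (by simp)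
      (by intro j hj; simp [List.getD_eq_getElem?_getD, hj,
            pvF_zero np j (by omega)])
      (by simp [pvT]) hpos (by omega)
    obtain ⟨hAlen, hApt⟩ := hA
    unfold distributionCandies
    apply List.ext_getElem (by omega)
    intro j hj1 hj2
    have h1 := hApt j (by omega)
    have h2 := hbpt j (by omega)
    rw [List.getD_eq_getElem?_getD, List.getElem?_eq_getElem hj1] at h1
    rw [List.getD_eq_getElem?_getD, List.getElem?_eq_getElem hj2] at h2
    exact h1.trans h2.symm
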